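-- pv_equiv track=rewrite | github.com/arunmurali19/bg-best-year | data_pipeline/seed_bracket.py | tennis_seed_positions
-- ===== SOURCE A (Python) =====
-- def tennis_seed_positions(n: int) -> list[int]:
--     """Generate tennis-style seed positions for an n-team bracket.
--
--     Returns a flat list where adjacent pairs form round-1 matchups.
--     E.g. for n=4: [1, 4, 2, 3] means matchups (1v4) and (2v3).
--     For n=8: [1, 8, 4, 5, 2, 7, 3, 6] means (1v8), (4v5), (2v7), (3v6).
--
--     This ensures:
--       - #1 and #2 can only meet in the final
--       - #1-#4 can only meet in the semis
--       - #1-#8 can only meet in the quarters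
--     """
--     bracket = [1, 2]
--     while len(bracket) < n:
--         new_bracket = []
--         next_sum = len(bracket) * 2 + 1
--         for seed in bracket:
--             new_bracket.append(seed)
--             new_bracket.append(next_sum - seed)
--         bracket = new_bracket
--     return bracket
-- ===== SOURCE B (Python) =====
-- def tennis_seed_positions(n: int) -> list[int]:
--     # Compute the bracket size m (2, or the smallest power of two reaching n),
--     # then decode each position independently from the bits of its index.
--     m = 2
--     while m < n:
--         m *= 2
--     def value(i: int, m: int) -> int:
--         # peel low bits of i while halving m, then rebuild from the base case up
--         flips = []
--         while m > 2:
--             flips.append(i % 2)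
--             i >>= 1
--             m //= 2
--         v = (i & 1) + 1
--         for f in reversed(flips):
--             m *= 2
--             if f:
--                 v = m + 1 - v
--         return v
--     return [value(i, m) for i in range(m)]
-- ===== Notes on version B (the rewrite author's own statement) =====
-- stated objective: alternative
-- what changed: Replaces the repeated whole-list doubling with a closed computation of the bracket size m followed by an independent per-index bit-decode of each seed position.
import Mathlib
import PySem

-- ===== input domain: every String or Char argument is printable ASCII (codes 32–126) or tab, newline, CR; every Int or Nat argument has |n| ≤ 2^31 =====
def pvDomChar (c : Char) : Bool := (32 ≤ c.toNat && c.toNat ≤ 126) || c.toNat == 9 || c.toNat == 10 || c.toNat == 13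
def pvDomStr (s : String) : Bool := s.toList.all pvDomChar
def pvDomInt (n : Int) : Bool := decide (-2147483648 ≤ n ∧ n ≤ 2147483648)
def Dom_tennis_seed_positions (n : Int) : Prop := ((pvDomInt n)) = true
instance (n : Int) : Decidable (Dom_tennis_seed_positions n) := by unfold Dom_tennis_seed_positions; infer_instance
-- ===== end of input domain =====

-- B replaces A's repeated whole-list doubling by computing the bracket size once and
-- bit-decoding each seed position independently from its index (objective: alternative algorithm).

-- ===== PORT A =====
-- cited by the port's termination proof: length of the loop body's two appends per element
theorem pvFoldlLen {α : Type} (g1 g2 : α → Int) (l : List α) (acc : List Int) :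
    (l.foldl (fun a x => (a ++ [g1 x]) ++ [g2 x]) acc).length = acc.length + 2 * l.length := by
  induction l generalizing acc with
  | nil => simp
  | cons x xs ih => rw [List.foldl_cons, ih]; simp; omega

def tennis_seed_positions_loop (n : Int) (bracket : List Int) (h : 0 < bracket.length) : List Int :=
  if (bracket.length : Int) < n then
    -- new_bracket = []; next_sum = len(bracket)*2 + 1; for seed: append seed; append next_sum - seed
    tennis_seed_positions_loop n
      (bracket.foldl (fun a seed => (a ++ [seed]) ++ [((bracket.length : Int) * 2 + 1) - seed]) [])
      (by rw [pvFoldlLen]; simp; omega)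
  else bracket
termination_by (n - bracket.length).toNat
decreasing_by
  rw [pvFoldlLen]
  simp only [List.length_nil, List.length_attach]
  omega

def tennis_seed_positions (n : Int) : List Int :=
  tennis_seed_positions_loop n [1, 2] (by decide)

-- ===== PORT B =====
-- m = 2; while m < n: m *= 2
def pvAltGrow (n m : Int) (h : 0 < m) : Int :=
  if m < n then pvAltGrow n (m * 2) (by omega) else m
termination_by (n - m).toNat
decreasing_by omega

-- the 'while m > 2' peel phase of value(i, m): returns (flips, i, m)
def pvAltPeel (i m : Int) (flips : List Int) : List Int × Int × Int :=
  if 2 < m then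
    pvAltPeel (PySem.Int.floordiv i 2) (PySem.Int.floordiv m 2) (flips ++ [PySem.Int.mod i 2])
  else (flips, i, m)
termination_by m.toNat
decreasing_by
  rename_i hm
  rw [PySem.Int.floordiv_eq_ediv_of_pos (by norm_num)]
  omega

-- value(i, m): peel low bits of i while halving m, then rebuild from the base case up
def pvAltValue (i m : Int) : Int :=
  let r := pvAltPeel i m []
  let v := PySem.Int.mod r.2.1 2 + 1      -- (i & 1) + 1 : for the divisor 2, i & 1 = i % 2 exactly
  (r.1.reverse.foldl
    (fun p f => (p.1 * 2, if f ≠ 0 then p.1 * 2 + 1 - p.2 else p.2)) (r.2.2, v)).2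

def tennis_seed_positions_alt (n : Int) : List Int :=
  let m := pvAltGrow n 2 (by norm_num)
  (PySem.List.pyRange 0 m 1).map (fun i => pvAltValue i m)

-- ===== PRECONDITION & SPEC =====
def Spec_tennis_seed_positions (n : Int) (out : List Int) : Prop := out = tennis_seed_positions_alt n
instance (n : Int) (out : List Int) : Decidable (Spec_tennis_seed_positions n out) := by unfold Spec_tennis_seed_positions; infer_instance

-- ===== CLAIM (what is proved, stated in full; the proofs are below) =====
def Claim_equal_tennis_seed_positions : Prop := ∀ (n : Int), Dom_tennis_seed_positions n → Spec_tennis_seed_positions n (tennis_seed_positions n)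

-- ===== LEMMAS AND PROOFS =====

-- the size-m bracket that B's decoder describes
def pvDecode (m : Int) : List Int :=
  (PySem.List.pyRange 0 m 1).map (fun i => pvAltValue i m)

theorem pvAlt_eq_decode (n : Int) :
    tennis_seed_positions_alt n = pvDecode (pvAltGrow n 2 (by norm_num)) := rfl

theorem pvPeel_stop (i m : Int) (fl : List Int) (h : ¬ 2 < m) :
    pvAltPeel i m fl = (fl, i, m) := by
  rw [pvAltPeel, if_neg h]

theorem pvPeel_step (i m : Int) (fl : List Int) (h : 2 < m) :
    pvAltPeel i m fl
      = pvAltPeel (PySem.Int.floordiv i 2) (PySem.Int.floordiv m 2) (fl ++ [PySem.Int.mod i 2]) := by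
  rw [pvAltPeel, if_pos h]

theorem pvPeel_acc (k : Nat) :
    ∀ (i m : Int), m.toNat ≤ k → ∀ (fl : List Int),
      pvAltPeel i m fl = (fl ++ (pvAltPeel i m []).1, (pvAltPeel i m []).2) := by
  induction k with
  | zero =>
    intro i m hm fl
    rw [pvPeel_stop i m fl (by omega), pvPeel_stop i m [] (by omega)]
    simp
  | succ k ih =>
    intro i m hm fl
    by_cases h2 : 2 < m
    · have hdiv : PySem.Int.floordiv m 2 = m / 2 :=
        PySem.Int.floordiv_eq_ediv_of_pos (by norm_num)
      have hlt : (PySem.Int.floordiv m 2).toNat ≤ k := by rw [hdiv]; omega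
      rw [pvPeel_step i m fl h2, pvPeel_step i m [] h2]
      rw [ih _ _ hlt (fl ++ [PySem.Int.mod i 2]), ih _ _ hlt ([] ++ [PySem.Int.mod i 2])]
      simp
    · rw [pvPeel_stop i m fl h2, pvPeel_stop i m [] h2]
      simp

theorem pvRebuild_fst (l : List Int) :
    ∀ (a v : Int),
      (l.foldl (fun p f => (p.1 * 2, if f ≠ 0 then p.1 * 2 + 1 - p.2 else p.2)) (a, v)).1
        = a * 2 ^ l.length := by
  induction l with
  | nil => intro a v; simp
  | cons x xs ih =>
    intro a v
    rw [List.foldl_cons, ih]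
    simp [pow_succ]
    ring

theorem pvPeel_pow (k : Nat) (hk : 1 ≤ k) (i : Int) :
    (pvAltPeel i ((2 : Int) ^ k) []).2.2 = 2 ∧ (pvAltPeel i ((2 : Int) ^ k) []).1.length = k - 1 := by
  induction k generalizing i with
  | zero => omega
  | succ k ih =>
    by_cases hk1 : 1 ≤ k
    · have hgt : (2 : Int) < 2 ^ (k + 1) := by
        have : (2 : Int) ^ 1 < 2 ^ (k + 1) := by
          apply pow_lt_pow_right₀ (by norm_num) (by omega)
        simpa using this
      have hdiv : PySem.Int.floordiv ((2 : Int) ^ (k + 1)) 2 = (2 : Int) ^ k := by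
        rw [PySem.Int.floordiv_eq_ediv_of_pos (by norm_num), pow_succ]
        exact Int.mul_ediv_cancel _ (by norm_num)
      rw [pvPeel_step _ _ _ hgt, hdiv]
      rw [pvPeel_acc ((2 : Int) ^ k).toNat _ _ le_rfl]
      obtain ⟨h1, h2⟩ := ih hk1 (PySem.Int.floordiv i 2)
      refine ⟨h1, ?_⟩
      simp only [List.nil_append, List.length_append, List.length_cons, List.length_nil, h2]
      omega
    · have hk0 : k = 0 := by omega
      subst hk0
      rw [pvPeel_stop _ _ _ (by norm_num)]
      simp

theorem pvVal_even (j m : Int) (hm : 2 ≤ m) :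
    pvAltValue (2 * j) (2 * m) = pvAltValue j m := by
  have hpeel : pvAltPeel (2 * j) (2 * m) [] = pvAltPeel j m [0] := by
    rw [pvPeel_step _ _ _ (by omega)]
    have h1 : PySem.Int.floordiv (2 * j) 2 = j := by
      rw [PySem.Int.floordiv_eq_ediv_of_pos (by norm_num)]; omega
    have h2 : PySem.Int.mod (2 * j) 2 = 0 := by
      rw [PySem.Int.mod_eq_emod_of_pos (by norm_num)]; omega
    have h3 : PySem.Int.floordiv (2 * m) 2 = m := by
      rw [PySem.Int.floordiv_eq_ediv_of_pos (by norm_num)]; omega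
    rw [h1, h2, h3]
    simp
  unfold pvAltValue
  rw [hpeel, pvPeel_acc m.toNat _ _ le_rfl [0]]
  simp [List.foldl_append]

theorem pvVal_odd (j m : Int) (k : Nat) (hk : 1 ≤ k) (hm : m = (2 : Int) ^ k) :
    pvAltValue (2 * j + 1) (2 * m) = 2 * m + 1 - pvAltValue j m := by
  have hm2 : 2 ≤ m := by
    rw [hm]
    calc (2 : Int) = 2 ^ 1 := by norm_num
    _ ≤ 2 ^ k := by apply pow_le_pow_right₀ (by norm_num) (by omega)
  have hpeel : pvAltPeel (2 * j + 1) (2 * m) [] = pvAltPeel j m [1] := by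
    rw [pvPeel_step _ _ _ (by omega)]
    have h1 : PySem.Int.floordiv (2 * j + 1) 2 = j := by
      rw [PySem.Int.floordiv_eq_ediv_of_pos (by norm_num)]; omega
    have h2 : PySem.Int.mod (2 * j + 1) 2 = 1 := by
      rw [PySem.Int.mod_eq_emod_of_pos (by norm_num)]; omega
    have h3 : PySem.Int.floordiv (2 * m) 2 = m := by
      rw [PySem.Int.floordiv_eq_ediv_of_pos (by norm_num)]; omega
    rw [h1, h2, h3]
    simp
  obtain ⟨hbase, hlen⟩ := pvPeel_pow k hk j
  rw [← hm] at hbase hlen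
  unfold pvAltValue
  rw [hpeel, pvPeel_acc m.toNat _ _ le_rfl [1]]
  simp only [List.reverse_cons, List.nil_append,
    List.cons_append, List.foldl_append, List.foldl_cons, List.foldl_nil]
  rw [pvRebuild_fst]
  simp only [List.length_reverse, hbase, hlen]
  rw [if_pos (by norm_num)]
  have hpow : (2 : Int) * 2 ^ (k - 1) = m := by
    rw [hm, ← pow_succ']
    congr 1
    omega
  rw [hpow]
  ring_nf

theorem pvRange_double_nat (M : Nat) :
    List.range (2 * M) = (List.range M).flatMap (fun k => [2 * k, 2 * k + 1]) := by
  induction M with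
  | zero => simp
  | succ M ih =>
    have h : 2 * (M + 1) = (2 * M + 1) + 1 := by ring
    rw [h, List.range_succ, List.range_succ, ih, List.range_succ]
    simp

theorem pvRange_double (m : Int) (hm : 0 ≤ m) :
    PySem.List.pyRange 0 (2 * m) 1
      = (PySem.List.pyRange 0 m 1).flatMap (fun j => [2 * j, 2 * j + 1]) := by
  rw [PySem.List.pyRange_one, PySem.List.pyRange_one]
  have h1 : (2 * m - 0).toNat = 2 * (m - 0).toNat := by omega
  rw [h1, pvRange_double_nat, List.flatMap_map, List.map_flatMap]
  apply List.flatMap_congr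
  intro k _
  simp

theorem pvTwo_le_pow (k : Nat) (hk : 1 ≤ k) : (2 : Int) ≤ 2 ^ k := by
  calc (2 : Int) = 2 ^ 1 := by norm_num
  _ ≤ 2 ^ k := by apply pow_le_pow_right₀ (by norm_num) (by omega)

theorem pvStep_decode (k : Nat) (hk : 1 ≤ k) (m : Int) (hm : m = (2 : Int) ^ k) :
    (pvDecode m).flatMap (fun s => [s, m * 2 + 1 - s]) = pvDecode (2 * m) := by
  have hm2 : 2 ≤ m := hm ▸ pvTwo_le_pow k hk
  unfold pvDecode
  rw [pvRange_double m (by omega), List.map_flatMap, List.flatMap_map]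
  apply List.flatMap_congr
  intro j _
  simp [pvVal_even j m hm2, pvVal_odd j m k hk hm]
  ring

theorem pvDecode_length (m : Int) (hm : 0 ≤ m) : ((pvDecode m).length : Int) = m := by
  simp [pvDecode, PySem.List.length_pyRange_one]
  omega

theorem pvVal_base (i : Int) : pvAltValue i 2 = PySem.Int.mod i 2 + 1 := by
  unfold pvAltValue
  rw [pvPeel_stop _ _ _ (by norm_num)]
  simp

theorem pvDecode_two : [(1 : Int), 2] = pvDecode 2 := by
  unfold pvDecode
  rw [show PySem.List.pyRange 0 2 1 = [0, 1] by decide]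
  rw [List.map_cons, List.map_cons, List.map_nil, pvVal_base, pvVal_base]
  decide

theorem pvFoldl_flatMap (c : Int) (l acc : List Int) :
    l.foldl (fun a s => (a ++ [s]) ++ [c - s]) acc = acc ++ l.flatMap (fun s => [s, c - s]) := by
  induction l generalizing acc with
  | nil => simp
  | cons x xs ih => rw [List.foldl_cons, ih]; simp

theorem pvLoop_eq (n : Int) (j : Nat) :
    ∀ (k : Nat) (hk : 1 ≤ k) (m : Int) (hm : m = (2 : Int) ^ k) (_ : (n - m).toNat ≤ j)
      (b : List Int) (h : 0 < b.length) (_ : (b.length : Int) = m) (_ : b = pvDecode m),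
      tennis_seed_positions_loop n b h = pvDecode (pvAltGrow n m (by
        have := pvTwo_le_pow k hk; omega)) := by
  induction j with
  | zero =>
    intro k hk m hm hj b h hlen hb
    have hm2 : 2 ≤ m := hm ▸ pvTwo_le_pow k hk
    have hnm : ¬ m < n := by omega
    rw [tennis_seed_positions_loop, pvAltGrow]
    simp only [hlen, if_neg hnm]
    exact hb
  | succ j ih =>
    intro k hk m hm hj b h hlen hb
    have hm2 : 2 ≤ m := hm ▸ pvTwo_le_pow k hk
    by_cases hnm : m < n
    · rw [tennis_seed_positions_loop, pvAltGrow]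
      rw [if_pos (show (b.length : Int) < n by omega), if_pos hnm]
      have hstep : b.foldl (fun a seed => (a ++ [seed]) ++ [((b.length : Int) * 2 + 1) - seed]) []
          = pvDecode (2 * m) := by
        rw [pvFoldl_flatMap, List.nil_append, hlen]
        conv_lhs => rw [hb]
        exact pvStep_decode k hk m hm
      have hlen2 : (((pvDecode (2 * m)).length : Int)) = 2 * m := pvDecode_length _ (by omega)
      have hres := ih (k + 1) (by omega) (2 * m) (by rw [hm, pow_succ]; ring) (by omega)
        (pvDecode (2 * m)) (by omega) hlen2 rfl
      simp only [show m * 2 = 2 * m from by ring, hstep]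
      exact hres
    · rw [tennis_seed_positions_loop, pvAltGrow]
      simp only [hlen, if_neg hnm]
      exact hb

-- ===== VERDICT (by name: the statement is the Claim_ definition above) =====
theorem tennis_seed_positions_spec : Claim_equal_tennis_seed_positions := by
  unfold Claim_equal_tennis_seed_positions
  intro n _
  unfold Spec_tennis_seed_positions
  rw [pvAlt_eq_decode]
  unfold tennis_seed_positions
  exact pvLoop_eq n (n - 2).toNat 1 le_rfl 2 (by norm_num) (by omega) [1, 2] (by decide)
    (by decide) pvDecode_two
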